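-- pv_equiv track=rewrite | github.com/obaidrana4303/RAG_Diagnostic--Reasoning-for-Clinical-Notes | utils.py | preprocess_text
-- ===== SOURCE A (Python) =====
-- from typing import List, Dict, Tuple
--
-- def preprocess_text(text: str) -> List[str]:
--     """
--     Tokenizes text, removing punctuation and common stop words.
--     """
--     # Simple list of stop words
--     stop_words = set([
--         "the", "a", "an", "and", "or", "but", "in", "on", "at", "to", "for", "of", "with", "by",
--         "is", "are", "was", "were", "be", "been", "being", "have", "has", "had", "do", "does", "did",
--         "it", "this", "that", "these", "those", "i", "you", "he", "she", "we", "they", "me", "him", "her", "us", "them",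
--         "what", "which", "who", "whom", "whose", "where", "when", "why", "how",
--         "all", "any", "both", "each", "few", "more", "most", "other", "some", "such",
--         "no", "nor", "not", "only", "own", "same", "so", "than", "too", "very",
--         "can", "will", "just", "should", "now"
--     ])
--
--     # Remove punctuation and convert to lower case
--     text = text.lower()
--     for char in '!"#$%&\'()*+,-./:;<=>?@[\\]^_`{|}~':
--         text = text.replace(char, ' ')
--
--     tokens = text.split()
--     return [t for t in tokens if t not in stop_words]
-- ===== SOURCE B (Python) =====
-- def preprocess_text(text):
--     """
--     Index-based scanner: skip delimiter runs, slice out each maximal word run,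
--     and keep it unless it is a stop word (filter inlined into the scan).
--     """
--     stop_words = frozenset(
--         "the a an and or but in on at to for of with by "
--         "is are was were be been being have has had do does did "
--         "it this that these those i you he she we they me him her us them "
--         "what which who whom whose where when why how "
--         "all any both each few more most other some such "
--         "no nor not only own same so than too very "
--         "can will just should now".split())
--     punct = '!"#$%&\'()*+,-./:;<=>?@[\\]^_`{|}~'
--     s = text.lower()
--     n = len(s)
--     out = []
--     i = 0
--     while i < n:
--         while i < n and (s[i] in punct or s[i].isspace()):
--             i += 1
--         j = i
--         while j < n and not (s[j] in punct or s[j].isspace()):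
--             j += 1
--         if j > i:
--             w = s[i:j]
--             if w not in stop_words:
--                 out.append(w)
--         i = j
--     return out
-- ===== Notes on version B (the rewrite author's own statement) =====
-- stated objective: alternative
-- what changed: Replaces A's 32 whole-string replace passes followed by split()+filter with a single index-based scanner that skips delimiter runs, slices out each maximal word run, and drops stop words inline during the scan.
import Mathlib
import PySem

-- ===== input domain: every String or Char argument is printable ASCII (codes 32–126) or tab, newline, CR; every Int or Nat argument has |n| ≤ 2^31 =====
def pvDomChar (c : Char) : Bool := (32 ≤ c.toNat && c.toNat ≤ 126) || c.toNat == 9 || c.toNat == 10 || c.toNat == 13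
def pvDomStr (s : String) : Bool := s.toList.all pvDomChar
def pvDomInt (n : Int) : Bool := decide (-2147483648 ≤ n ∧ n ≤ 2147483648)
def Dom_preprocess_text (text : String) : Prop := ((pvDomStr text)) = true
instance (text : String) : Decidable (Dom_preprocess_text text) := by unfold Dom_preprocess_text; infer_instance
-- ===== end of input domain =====

-- B scans the lowercased text once, skipping delimiter runs and slicing out maximal word
-- runs with the stop-word filter inlined, instead of A's 32 replace passes + split + filter.

-- ===== PORT A =====
def pvStopWords : List String :=
  ["the", "a", "an", "and", "or", "but", "in", "on", "at", "to", "for", "of", "with", "by",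
   "is", "are", "was", "were", "be", "been", "being", "have", "has", "had", "do", "does", "did",
   "it", "this", "that", "these", "those", "i", "you", "he", "she", "we", "they", "me", "him", "her", "us", "them",
   "what", "which", "who", "whom", "whose", "where", "when", "why", "how",
   "all", "any", "both", "each", "few", "more", "most", "other", "some", "such",
   "no", "nor", "not", "only", "own", "same", "so", "than", "too", "very",
   "can", "will", "just", "should", "now"]

def pvPunct : List Char :=
  ['!', '"', '#', '$', '%', '&', '\'', '(', ')', '*', '+', ',', '-', '.', '/', ':', ';',
   '<', '=', '>', '?', '@', '[', '\\', ']', '^', '_', '`', '{', '|', '}', '~']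

def preprocess_text (text : String) : List String :=
  -- text = text.lower(); for char in punct: text = text.replace(char, ' ')
  let t := pvPunct.foldl (fun s c => PySem.Str.replace s (String.ofList [c]) " ") (PySem.Str.lower text)
  -- tokens = text.split(); [t for t in tokens if t not in stop_words]
  (PySem.Str.split₀ t).filter (fun w => !(pvStopWords.contains w))

-- ===== PORT B =====
-- stop_words = frozenset("the a an … now".split())
def pvStopB : List String :=
  PySem.Str.split₀ ("the a an and or but in on at to for of with by is are was were be been being have has had do does did it this that these those i you he she we they me him her us them what which who whom whose where when why how all any both each few more most other some such no nor not only own same so than too very can will just should now")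

-- punct = '!"#$%&\'()*+,-./:;<=>?@[\\]^_`{|}~'
def pvPunctB : List Char := ("!\"#$%&'()*+,-./:;<=>?@[\\]^_`{|}~").toList

-- s[i] in punct or s[i].isspace()
def pvDelimB (c : Char) : Bool := pvPunctB.contains c || PySem.Chars.isspace c

-- the while-loop pair: skip a delimiter run, then slice out the maximal word run
def pvScan : List Char → List String
  | [] => []
  | c :: rest =>
    if pvDelimB c then pvScan rest
    else
      let w := String.ofList (c :: rest.takeWhile (fun x => !pvDelimB x))
      (if pvStopB.contains w then [] else [w]) ++ pvScan (rest.dropWhile (fun x => !pvDelimB x))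
  termination_by cs => cs.length
  decreasing_by
  · simp
  · simp only [List.length_cons]
    exact Nat.lt_succ_of_le (List.length_dropWhile_le _ _)

def preprocess_text_alt (text : String) : List String :=
  pvScan (PySem.Chars.lower text.toList)

-- ===== PRECONDITION & SPEC =====
def Spec_preprocess_text (text : String) (out : List String) : Prop := out = preprocess_text_alt text
instance (text : String) (out : List String) : Decidable (Spec_preprocess_text text out) := by unfold Spec_preprocess_text; infer_instance

-- ===== CLAIM =====
def Claim_equal_preprocess_text : Prop := ∀ (text : String), Dom_preprocess_text text → Spec_preprocess_text text (preprocess_text text)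

-- ===== LEMMAS AND PROOFS =====

-- generic whitespace-style tokenizer with an arbitrary delimiter predicate (mirrors PySem.Chars.split₀.go)
def pvTok (q : Char → Bool) : List Char → List Char → List (List Char) → List (List Char)
  | [], cur, acc => if cur.isEmpty then acc.reverse else (cur.reverse :: acc).reverse
  | c :: rest, cur, acc =>
      if q c then
        (if cur.isEmpty then pvTok q rest [] acc else pvTok q rest [] (cur.reverse :: acc))
      else pvTok q rest (c :: cur) acc

-- structural run-splitter (the shape of pvScan, without the filter)
def pvRuns (q : Char → Bool) : List Char → List (List Char)
  | [] => []
  | c :: rest =>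
    if q c then pvRuns q rest
    else (c :: rest.takeWhile (fun x => !q x)) :: pvRuns q (rest.dropWhile (fun x => !q x))
  termination_by cs => cs.length
  decreasing_by
  · simp
  · simp only [List.length_cons]
    exact Nat.lt_succ_of_le (List.length_dropWhile_le _ _)

theorem pvRuns_nil (q : Char → Bool) : pvRuns q [] = [] := by rw [pvRuns]

theorem pvRuns_cons (q : Char → Bool) (c : Char) (rest : List Char) :
    pvRuns q (c :: rest)
      = if q c then pvRuns q rest
        else (c :: rest.takeWhile (fun x => !q x)) :: pvRuns q (rest.dropWhile (fun x => !q x)) := by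
  rw [pvRuns]

theorem pvScan_nil : pvScan [] = [] := by rw [pvScan]

theorem pvScan_cons (c : Char) (rest : List Char) :
    pvScan (c :: rest)
      = if pvDelimB c then pvScan rest
        else
          (if pvStopB.contains (String.ofList (c :: rest.takeWhile (fun x => !pvDelimB x))) then []
           else [String.ofList (c :: rest.takeWhile (fun x => !pvDelimB x))])
          ++ pvScan (rest.dropWhile (fun x => !pvDelimB x)) := by
  rw [pvScan]

theorem pvSplit₀_go_eq_pvTok (cs cur : List Char) (acc : List (List Char)) :
    PySem.Chars.split₀.go cs cur acc = pvTok PySem.Chars.isspace cs cur acc := by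
  induction cs generalizing cur acc with
  | nil => rw [PySem.Chars.split₀.go, pvTok]
  | cons c rest ih =>
      rw [PySem.Chars.split₀.go, pvTok]
      by_cases h : PySem.Chars.isspace c <;> simp [h, ih]

theorem pvReplace_go_single (c : Char) (cs acc : List Char) :
    PySem.Chars.replace.go [c] [' '] cs.length cs acc
      = acc.reverse ++ cs.map (fun x => if x = c then ' ' else x) := by
  induction cs generalizing acc with
  | nil =>
      simp only [List.length_nil, List.map_nil]
      rw [PySem.Chars.replace.go]
  | cons x t ih =>
      rw [List.length_cons, PySem.Chars.replace.go]
      by_cases h : c = x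
      · subst h
        simp only [List.isPrefixOf, BEq.rfl, Bool.true_and, if_pos]
        simp [ih]
      · have hb : ([c].isPrefixOf (x :: t)) = false := by
          simp [List.isPrefixOf, h]
        simp only [hb, Bool.false_eq_true, if_neg, not_false_iff]
        simp [ih, Ne.symm h]

theorem pvReplace_single (c : Char) (cs : List Char) :
    PySem.Chars.replace cs [c] [' '] = cs.map (fun x => if x = c then ' ' else x) := by
  unfold PySem.Chars.replace
  simpa using pvReplace_go_single c cs []

theorem pvFoldl_replace (ps : List Char) (cs : List Char) :
    ps.foldl (fun l c => PySem.Chars.replace l [c] [' ']) cs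
      = cs.map (fun x => if ps.contains x then ' ' else x) := by
  induction ps generalizing cs with
  | nil => simp
  | cons p ps ih =>
      rw [List.foldl_cons, pvReplace_single, ih, List.map_map]
      apply List.map_congr_left
      intro x _
      by_cases hx : x = p
      · subst hx; simp [Function.comp]
      · simp [Function.comp, hx]

theorem pvTok_map (f : Char → Char) (p q : Char → Bool)
    (h1 : ∀ c, p (f c) = q c) (h2 : ∀ c, q c = false → f c = c)
    (cs cur : List Char) (acc : List (List Char)) :
    pvTok p (cs.map f) cur acc = pvTok q cs cur acc := by
  induction cs generalizing cur acc with
  | nil => rfl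
  | cons c rest ih =>
      simp only [List.map_cons, pvTok, h1 c]
      by_cases hq : q c
      · simp [hq, ih]
      · have := h2 c (by simpa using hq)
        simp [hq, this, ih]

-- accumulator-passing tokenizer = structural run-splitter
theorem pvTok_eq_pvRuns (q : Char → Bool) (cs cur : List Char) (acc : List (List Char)) :
    pvTok q cs cur acc
      = acc.reverse ++
        (if cur.isEmpty then pvRuns q cs
         else (cur.reverse ++ cs.takeWhile (fun x => !q x))
              :: pvRuns q (cs.dropWhile (fun x => !q x))) := by
  induction cs generalizing cur acc with
  | nil =>
      rw [pvTok]
      by_cases hc : cur.isEmpty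
      · simp [hc, pvRuns_nil]
      · simp [hc, pvRuns_nil]
  | cons c rest ih =>
      rw [pvTok, pvRuns_cons]
      by_cases hq : q c
      · by_cases hc : cur.isEmpty
        · simp only [hq, if_pos, hc]
          rw [ih]
          simp
        · simp only [hq, if_pos, hc, Bool.false_eq_true, if_neg, not_false_iff]
          rw [ih]
          simp [hq, pvRuns_cons]
      · simp only [hq, Bool.false_eq_true, if_neg, not_false_iff]
        rw [ih]
        by_cases hc : cur.isEmpty
        · have : cur = [] := by simpa [List.isEmpty_iff] using hc
          subst this
          simp
        · simp [hq, hc]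

-- pvScan = filter of the mapped run-splitter
theorem pvScan_eq (cs : List Char) :
    pvScan cs = ((pvRuns pvDelimB cs).map String.ofList).filter
        (fun w => !(pvStopB.contains w)) := by
  induction cs using pvScan.induct with
  | case1 => rw [pvScan_nil, pvRuns_nil]; rfl
  | case2 c rest hq ih =>
      rw [pvScan_cons, pvRuns_cons]
      simp only [hq, if_pos, ih]
  | case3 c rest hq ih =>
      rw [pvScan_cons, pvRuns_cons]
      simp only [hq, Bool.false_eq_true, if_neg, not_false_iff, List.map_cons, List.filter_cons]
      by_cases hs : String.ofList (c :: rest.takeWhile (fun x => !pvDelimB x)) ∈ pvStopB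
      · simp [hs, ih]
      · simp [hs, ih]

theorem pvStrFoldReplace (ps : List Char) (s : String) :
    (ps.foldl (fun s c => PySem.Str.replace s (String.ofList [c]) " ") s).toList
      = ps.foldl (fun l c => PySem.Chars.replace l [c] [' ']) s.toList := by
  induction ps generalizing s with
  | nil => rfl
  | cons p ps ih =>
      simp only [List.foldl_cons, ih, PySem.Str.toList_replace, String.toList_ofList]
      rfl

theorem pvStrSplit₀ (s : String) :
    PySem.Str.split₀ s = (PySem.Chars.split₀ s.toList).map String.ofList := by
  rw [← PySem.Str.split₀_map_toList, List.map_map]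
  simp [Function.comp_def, String.ofList_toList]

theorem pvPunct_eq : pvPunctB = pvPunct := by decide

set_option maxRecDepth 20000 in
theorem pvStop_eq : pvStopB = pvStopWords := by decide

theorem pvDelim_of_map (c : Char) :
    PySem.Chars.isspace (if pvPunct.contains c then ' ' else c) = pvDelimB c := by
  have hsp : PySem.Chars.isspace ' ' = true := by decide
  by_cases h : pvPunct.contains c
  · have h' : c ∈ pvPunct := by simpa using h
    rw [if_pos h, hsp]
    simp [pvDelimB, pvPunct_eq, h']
  · have h' : c ∉ pvPunct := by simpa using h
    rw [if_neg h]
    simp [pvDelimB, pvPunct_eq, h']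

-- ===== VERDICT =====
theorem preprocess_text_spec : Claim_equal_preprocess_text := by
  intro text _
  unfold Spec_preprocess_text preprocess_text preprocess_text_alt
  set L := PySem.Chars.lower text.toList with hL
  have hA : (pvPunct.foldl (fun s c => PySem.Str.replace s (String.ofList [c]) " ")
      (PySem.Str.lower text)).toList
      = L.map (fun x => if pvPunct.contains x then ' ' else x) := by
    rw [pvStrFoldReplace, pvFoldl_replace, PySem.Str.toList_lower]
  have htoks : PySem.Chars.split₀
      ((pvPunct.foldl (fun s c => PySem.Str.replace s (String.ofList [c]) " ")
        (PySem.Str.lower text)).toList)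
      = pvTok pvDelimB L [] [] := by
    rw [hA]
    unfold PySem.Chars.split₀
    rw [pvSplit₀_go_eq_pvTok]
    exact pvTok_map _ _ _ pvDelim_of_map
      (fun c hc => by
        simp only [pvDelimB, Bool.or_eq_false_iff] at hc
        have h1 : ¬ (pvPunct.contains c = true) := by
          rw [← pvPunct_eq, hc.1]; exact Bool.false_ne_true
        rw [if_neg h1]) L [] []
  have hAside : PySem.Str.split₀
      (pvPunct.foldl (fun s c => PySem.Str.replace s (String.ofList [c]) " ")
        (PySem.Str.lower text))
      = (pvTok pvDelimB L [] []).map String.ofList := by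
    rw [pvStrSplit₀, htoks]
  simp only [hAside]
  rw [pvScan_eq, pvTok_eq_pvRuns]
  simp [pvStop_eq]
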